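-- pv_equiv track=rewrite | github.com/alexzilligmm/pyFIDESlib | test/CrossImplementation/run_pyfideslib_differential.py | _matmul_proto_rotation_steps
-- ===== SOURCE A (Python) =====
-- def _matmul_proto_rotation_steps(row_size):
--     width = int(row_size)
--     shifts = set()
--     for row in range(width):
--         for col in range(width):
--             out_idx = row * width + col
--             for inner in range(width):
--                 idx_a = row * width + inner
--                 idx_b = inner * width + col
--                 shifts.add(idx_b - idx_a)
--                 shifts.add(out_idx - idx_b)
--     shifts.discard(0)
--     return sorted(int(s) for s in shifts)
-- ===== SOURCE B (Python) =====
-- def _matmul_proto_rotation_steps(row_size):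
--     # Closed form: every nonzero shift with |shift| <= (width-1)*width occurs.
--     width = int(row_size)
--     if width <= 1:
--         return []
--     m = (width - 1) * width
--     return list(range(-m, 0)) + list(range(1, m + 1))
-- ===== Notes on version B (the rewrite author's own statement) =====
-- stated objective: faster
-- what changed: Replaced the O(w^3) triple loop building a set of index differences by the proved closed form: the shifts are exactly all nonzero integers of absolute value at most (width-1)*width, emitted directly as two already-sorted ranges.
import Mathlib
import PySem

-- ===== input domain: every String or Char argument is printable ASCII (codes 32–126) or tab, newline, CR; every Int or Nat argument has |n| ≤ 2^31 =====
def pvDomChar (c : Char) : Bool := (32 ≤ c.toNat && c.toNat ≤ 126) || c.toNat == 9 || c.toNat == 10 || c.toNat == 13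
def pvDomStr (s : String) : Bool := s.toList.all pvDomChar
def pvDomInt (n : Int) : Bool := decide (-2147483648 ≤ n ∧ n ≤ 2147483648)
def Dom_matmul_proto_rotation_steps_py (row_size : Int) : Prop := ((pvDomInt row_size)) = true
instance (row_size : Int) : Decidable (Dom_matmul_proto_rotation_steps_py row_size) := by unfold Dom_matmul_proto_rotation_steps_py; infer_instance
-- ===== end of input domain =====

-- B replaces A's O(w^3) triple-loop set construction by the closed form
-- "all nonzero shifts s with |s| <= (width-1)*width", emitted as two sorted ranges.

-- ===== PORT A =====
def matmul_proto_rotation_steps_py (row_size : Int) : List Int :=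
  let width := row_size
  let shifts : PySem.Set Int :=
    (PySem.List.pyRange 0 width 1).foldl (fun s row =>
      (PySem.List.pyRange 0 width 1).foldl (fun s col =>
        let out_idx := row * width + col
        (PySem.List.pyRange 0 width 1).foldl (fun s inner =>
          let idx_a := row * width + inner
          let idx_b := inner * width + col
          PySem.Set.add (PySem.Set.add s (idx_b - idx_a)) (out_idx - idx_b)) s) s)
      PySem.Set.empty
  let shifts := PySem.Set.discard shifts 0
  PySem.List.sorted shifts (fun x => x) false

-- ===== PORT B =====
def matmul_proto_rotation_steps_py_alt (row_size : Int) : List Int :=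
  let width := row_size
  if width ≤ 1 then []
  else
    let m := (width - 1) * width
    PySem.List.pyRange (-m) 0 1 ++ PySem.List.pyRange 1 (m + 1) 1

-- ===== PRECONDITION & SPEC =====
def Spec_matmul_proto_rotation_steps_py (row_size : Int) (out : List Int) : Prop := out = matmul_proto_rotation_steps_py_alt row_size
instance (row_size : Int) (out : List Int) : Decidable (Spec_matmul_proto_rotation_steps_py row_size out) := by unfold Spec_matmul_proto_rotation_steps_py; infer_instance

-- ===== CLAIM (what is proved, stated in full; the proofs are below) =====
def Claim_equal_matmul_proto_rotation_steps_py : Prop := ∀ (row_size : Int), Dom_matmul_proto_rotation_steps_py row_size → Spec_matmul_proto_rotation_steps_py row_size (matmul_proto_rotation_steps_py row_size)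

-- ===== LEMMAS AND PROOFS =====

-- generic: membership in a foldl whose step satisfies a membership law
lemma pv_mem_foldl {β : Type} (step : List Int → β → List Int) (Q : β → Int → Prop)
    (h : ∀ s b x, x ∈ step s b ↔ x ∈ s ∨ Q b x) (l : List β) :
    ∀ (s : List Int) (x : Int), x ∈ l.foldl step s ↔ x ∈ s ∨ ∃ b ∈ l, Q b x := by
  induction l with
  | nil => simp
  | cons b t ih =>
    intro s x
    simp only [List.foldl_cons, ih, h, List.mem_cons]
    constructor
    · rintro ((hs | hq) | ⟨b', hb', hq⟩)
      · exact Or.inl hs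
      · exact Or.inr ⟨b, Or.inl rfl, hq⟩
      · exact Or.inr ⟨b', Or.inr hb', hq⟩
    · rintro (hs | ⟨b', (rfl | hb'), hq⟩)
      · exact Or.inl (Or.inl hs)
      · exact Or.inl (Or.inr hq)
      · exact Or.inr ⟨b', hb', hq⟩

-- generic: Nodup is preserved by a foldl whose step preserves it
lemma pv_nodup_foldl {β : Type} (step : List Int → β → List Int)
    (h : ∀ s b, s.Nodup → (step s b).Nodup) (l : List β) :
    ∀ (s : List Int), s.Nodup → (l.foldl step s).Nodup := by
  induction l with
  | nil => exact fun s hs => hs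
  | cons b t ih => intro s hs; exact ih _ (h s b hs)

-- the set A builds, before discarding 0
def pvShiftSet (w : Int) : PySem.Set Int :=
  (PySem.List.pyRange 0 w 1).foldl (fun s row =>
    (PySem.List.pyRange 0 w 1).foldl (fun s col =>
      (PySem.List.pyRange 0 w 1).foldl (fun s inner =>
        PySem.Set.add (PySem.Set.add s ((inner * w + col) - (row * w + inner)))
          ((row * w + col) - (inner * w + col))) s) s)
    PySem.Set.empty

lemma pvShiftSet_eq (w : Int) :
    matmul_proto_rotation_steps_py w
      = PySem.List.sorted (PySem.Set.discard (pvShiftSet w) 0) (fun x => x) false := rfl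

lemma pv_mem_shiftSet (w x : Int) :
    x ∈ pvShiftSet w ↔ ∃ row, (0 ≤ row ∧ row < w) ∧ ∃ col, (0 ≤ col ∧ col < w) ∧
      ∃ inner, (0 ≤ inner ∧ inner < w) ∧
        (x = (inner * w + col) - (row * w + inner) ∨ x = (row * w + col) - (inner * w + col)) := by
  unfold pvShiftSet
  rw [pv_mem_foldl _ (fun row x => ∃ col, (0 ≤ col ∧ col < w) ∧ ∃ inner, (0 ≤ inner ∧ inner < w) ∧
        (x = (inner * w + col) - (row * w + inner) ∨ x = (row * w + col) - (inner * w + col)))]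
  · simp [PySem.List.mem_pyRange_one, PySem.Set.empty]
  · intro s row x
    rw [pv_mem_foldl _ (fun col x => ∃ inner, (0 ≤ inner ∧ inner < w) ∧
          (x = (inner * w + col) - (row * w + inner) ∨ x = (row * w + col) - (inner * w + col)))]
    · simp [PySem.List.mem_pyRange_one]
    · intro s col x
      rw [pv_mem_foldl _ (fun inner x =>
            x = (inner * w + col) - (row * w + inner) ∨ x = (row * w + col) - (inner * w + col))]
      · simp [PySem.List.mem_pyRange_one]
      · intro s inner x
        simp [PySem.Set.mem_add, or_assoc]

lemma pv_nodup_shiftSet (w : Int) : (pvShiftSet w).Nodup := by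
  unfold pvShiftSet
  apply pv_nodup_foldl
  · intro s b hs
    apply pv_nodup_foldl
    · intro s b hs
      apply pv_nodup_foldl
      · intro s b hs
        exact PySem.Set.nodup_add _ _ (PySem.Set.nodup_add _ _ hs)
      · exact hs
    · exact hs
  · exact List.nodup_nil

-- arithmetic: the shifts are exactly the integers of absolute value ≤ (w-1)*w (for 1 ≤ w)
-- upper bound helper: p*w + d ≤ (w-1)*w under the triple-loop constraints
lemma pv_bound (w p d : Int) (hw : 1 ≤ w) (hp : p ≤ w - 1) (hd : d ≤ w - 1) (hs : p + d ≤ w - 1) :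
    p * w + d ≤ (w - 1) * w := by
  rcases le_or_gt p 0 with h | h
  · have h1 : p * w ≤ 0 := mul_nonpos_of_nonpos_of_nonneg h (by omega)
    nlinarith [mul_self_nonneg (w - 1)]
  · have h1 : p * (w - 1) ≤ (w - 1) * (w - 1) := mul_le_mul_of_nonneg_right hp (by omega)
    nlinarith

lemma pv_char (w x : Int) :
    (∃ row, (0 ≤ row ∧ row < w) ∧ ∃ col, (0 ≤ col ∧ col < w) ∧
      ∃ inner, (0 ≤ inner ∧ inner < w) ∧
        (x = (inner * w + col) - (row * w + inner) ∨ x = (row * w + col) - (inner * w + col)))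
    ↔ (1 ≤ w ∧ -((w - 1) * w) ≤ x ∧ x ≤ (w - 1) * w) := by
  constructor
  · rintro ⟨r, ⟨hr0, hrw⟩, c, ⟨hc0, hcw⟩, i, ⟨hi0, hiw⟩, h | h⟩
    · refine ⟨by omega, ?_, ?_⟩
      · have := pv_bound w (r - i) (i - c) (by omega) (by omega) (by omega) (by omega)
        nlinarith
      · have := pv_bound w (i - r) (c - i) (by omega) (by omega) (by omega) (by omega)
        nlinarith
    · refine ⟨by omega, ?_, ?_⟩
      · have := pv_bound w (i - r) 0 (by omega) (by omega) (by omega) (by omega)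
        nlinarith
      · have := pv_bound w (r - i) 0 (by omega) (by omega) (by omega) (by omega)
        nlinarith
  · rintro ⟨hw, hlo, hhi⟩
    rcases lt_trichotomy x 0 with hx | hx | hx
    · -- x < 0 : take q = x / w (floor), rem = x % w
      have hwpos : (0:Int) < w := by omega
      have hq : w * (x / w) + x % w = x := Int.ediv_add_emod x w
      have hr0 : 0 ≤ x % w := Int.emod_nonneg x (by omega)
      have hr1 : x % w < w := Int.emod_lt_of_pos x hwpos
      set q := x / w with hqdef
      set rem := x % w with hremdef
      have hqneg : q ≤ -1 := by
        by_contra hcon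
        have h0 : 0 ≤ q := by omega
        have : 0 ≤ w * q := mul_nonneg (by omega) h0
        omega
      have hqlb : -(w - 1) ≤ q := by
        by_contra hcon
        have h0 : q ≤ -w := by omega
        have h1 : w * q ≤ w * (-w) := mul_le_mul_of_nonneg_left h0 (by omega)
        nlinarith
      refine ⟨-q, ⟨by omega, by omega⟩, rem, ⟨by omega, by omega⟩, 0, ⟨by omega, hwpos⟩, Or.inl ?_⟩
      have hc : -q * w = -(w * q) := by ring
      omega
    · exact ⟨0, ⟨le_refl 0, by omega⟩, 0, ⟨le_refl 0, by omega⟩, 0, ⟨le_refl 0, by omega⟩,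
        Or.inl (by ring_nf; omega)⟩
    · -- 0 < x : take q = ceil(x / w) = (x + w - 1) / w
      have hwpos : (0:Int) < w := by omega
      have hw2 : 2 ≤ w := by
        by_contra hcon
        have : w = 1 := by omega
        subst this
        simp at hhi
        omega
      have hq : w * ((x + w - 1) / w) + (x + w - 1) % w = x + w - 1 :=
        Int.ediv_add_emod (x + w - 1) w
      have hr0 : 0 ≤ (x + w - 1) % w := Int.emod_nonneg _ (by omega)
      have hr1 : (x + w - 1) % w < w := Int.emod_lt_of_pos _ hwpos
      set q := (x + w - 1) / w with hqdef
      set rem := (x + w - 1) % w with hremdef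
      have hqpos : 1 ≤ q := by
        by_contra hcon
        have h0 : q ≤ 0 := by omega
        have : w * q ≤ 0 := mul_nonpos_of_nonneg_of_nonpos (by omega) h0
        omega
      have hqub : q ≤ w - 1 := by
        by_contra hcon
        have h0 : w ≤ q := by omega
        have h1 : w * w ≤ w * q := mul_le_mul_of_nonneg_left h0 (by omega)
        nlinarith
      refine ⟨w - 1 - q, ⟨by omega, by omega⟩, rem, ⟨by omega, by omega⟩, w - 1,
        ⟨by omega, by omega⟩, Or.inl ?_⟩
      have hc : (w - 1) * w - (w - 1 - q) * w = w * q := by ring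
      omega

lemma pv_mem_discard (w x : Int) :
    x ∈ PySem.Set.discard (pvShiftSet w) 0
      ↔ (1 ≤ w ∧ -((w - 1) * w) ≤ x ∧ x ≤ (w - 1) * w ∧ x ≠ 0) := by
  rw [PySem.Set.mem_discard, pv_mem_shiftSet, pv_char]
  tauto

-- ===== VERDICT (by name: the statement is the Claim_ definition above) =====
theorem matmul_proto_rotation_steps_py_spec : Claim_equal_matmul_proto_rotation_steps_py := by
  intro w _
  unfold Spec_matmul_proto_rotation_steps_py
  rw [pvShiftSet_eq]
  unfold matmul_proto_rotation_steps_py_alt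
  by_cases hw : w ≤ 1
  · have hD : PySem.Set.discard (pvShiftSet w) 0 = [] := by
      rw [List.eq_nil_iff_forall_not_mem]
      intro x hx
      rw [pv_mem_discard] at hx
      obtain ⟨h1, h2, h3, h4⟩ := hx
      have hw1 : w = 1 := by omega
      subst hw1
      simp at h2 h3
      omega
    simp [hD, hw, PySem.List.sorted]
  · rw [not_le] at hw
    have hw2 : 2 ≤ w := by omega
    rw [if_neg (by omega)]
    have hm0 : 0 ≤ (w - 1) * w := mul_nonneg (by omega) (by omega)
    set m := (w - 1) * w with hmdef
    have hpw : (PySem.List.pyRange (-m) 0 1 ++ PySem.List.pyRange 1 (m + 1) 1).Pairwise (· < ·) := by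
      rw [List.pairwise_append]
      refine ⟨PySem.List.pairwise_lt_pyRange_one _ _, PySem.List.pairwise_lt_pyRange_one _ _, ?_⟩
      intro a ha b hb
      rw [PySem.List.mem_pyRange_one] at ha hb
      omega
    have hperm : (PySem.List.pyRange (-m) 0 1 ++ PySem.List.pyRange 1 (m + 1) 1).Perm
        (PySem.Set.discard (pvShiftSet w) 0) := by
      rw [List.perm_ext_iff_of_nodup (hpw.imp ne_of_lt)
        (PySem.Set.nodup_discard _ _ (pv_nodup_shiftSet w))]
      intro x
      rw [List.mem_append, PySem.List.mem_pyRange_one, PySem.List.mem_pyRange_one, pv_mem_discard]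
      omega
    exact PySem.List.sorted_eq_of_perm_of_pairwise_lt _ _ _ hperm hpw
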